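-- pv_equiv track=rewrite | github.com/pierre-ung/c_parser_generator | gen.py | gen_h_code
-- ===== SOURCE A (Python) =====
-- def process_word(w):
--     res = w
--     equivalents = {"_" : "uscore", "{" : "rbrack", "}" : "lbrack", ";" : "semi", "," : "comma", "=" : "eq", "(" : "lpar", ")" : "rpar", " " : "epsilon"}
--     for key in equivalents:
--         res = res.replace(key, "_" + equivalents[key])
--     res2 = res
--     for c in res2:
--         if not (ord("0") <= ord(c) <= ord("9") or ord("a") <= ord(c) <= ord("z") or ord("A") <= ord(c) <= ord("Z")):
--             res = res.replace(c, "_" + str(ord(c)))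
--     return res
--
-- def gen_h_code(rules):
--     already_gen = []
--     code = ""
--     for rule in rules :
--         for compo in rule:
--             for char in compo[0]:
--                 if(char not in already_gen):
--                     code += "char **parse_" + process_word(char) + "(char **word);\n"
--                     already_gen.append(char)
--     return code
-- ===== SOURCE B (Python) =====
-- def process_word(w):
--     res = w
--     equivalents = {"_" : "uscore", "{" : "rbrack", "}" : "lbrack", ";" : "semi", "," : "comma", "=" : "eq", "(" : "lpar", ")" : "rpar", " " : "epsilon"}
--     for key in equivalents:
--         res = res.replace(key, "_" + equivalents[key])
--     res2 = res
--     for c in res2: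
--         if not (ord("0") <= ord(c) <= ord("9") or ord("a") <= ord(c) <= ord("z") or ord("A") <= ord(c) <= ord("Z")):
--             res = res.replace(c, "_" + str(ord(c)))
--     return res
--
-- def gen_h_code(rules):
--     # Phase 1: flatten the whole grammar into one string of symbol characters.
--     flat = "".join(compo[0] for rule in rules for compo in rule)
--     # Phase 2: the distinct characters, with first-occurrence order RECOVERED BY SORTING
--     # on each character's first index in flat (no seen-accumulator scan at all).
--     uniq = sorted(set(flat), key=flat.index)
--     # Phase 3: emit one prototype per distinct character.
--     return "".join("char **parse_" + process_word(c) + "(char **word);\n" for c in uniq)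
-- ===== Notes on version B (the rewrite author's own statement) =====
-- stated objective: alternative
-- what changed: A fuses dedup and emission in one triple loop with a growing seen-list scanned per character; B has no seen accumulator at all: it flattens the grammar to one string, takes its character set, recovers first-occurrence order by sorting on flat.index, and emits all lines in a final join.
import Mathlib
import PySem

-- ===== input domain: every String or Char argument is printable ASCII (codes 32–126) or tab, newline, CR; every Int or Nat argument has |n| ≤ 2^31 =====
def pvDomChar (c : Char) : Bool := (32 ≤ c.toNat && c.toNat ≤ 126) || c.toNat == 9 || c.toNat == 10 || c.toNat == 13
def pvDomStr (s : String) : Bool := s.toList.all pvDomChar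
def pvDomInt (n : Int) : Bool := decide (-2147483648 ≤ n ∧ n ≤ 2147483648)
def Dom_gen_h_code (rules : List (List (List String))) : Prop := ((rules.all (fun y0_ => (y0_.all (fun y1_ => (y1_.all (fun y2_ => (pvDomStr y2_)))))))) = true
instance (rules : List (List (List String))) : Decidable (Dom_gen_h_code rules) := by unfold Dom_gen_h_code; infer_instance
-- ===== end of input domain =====

-- B drops A's fused dedup-and-emit triple loop with its seen-list: it flattens the grammar
-- to one char sequence, recovers first-occurrence order by SORTING the char set on first
-- index, then emits in one pass; same values, similar cost (objective: alternative).

-- ===== PORT A =====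
-- shared helper: literal transliteration of process_word (identical in Source A and Source B)
def pwEquivalents : List (String × String) :=
  [("_", "uscore"), ("{", "rbrack"), ("}", "lbrack"), (";", "semi"), (",", "comma"),
   ("=", "eq"), ("(", "lpar"), (")", "rpar"), (" ", "epsilon")]

def processWord (w : String) : String :=
  let res := pwEquivalents.foldl (fun res kv => PySem.Str.replace res kv.1 ("_" ++ kv.2)) w
  let res2 := res
  res2.toList.foldl (fun res c =>
    if !((48 ≤ c.toNat && c.toNat ≤ 57) || (97 ≤ c.toNat && c.toNat ≤ 122) || (65 ≤ c.toNat && c.toNat ≤ 90))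
    then PySem.Str.replace res (String.ofList [c]) ("_" ++ PySem.Int.toStr (c.toNat : Int))
    else res) res

-- compo[0] raises IndexError on an empty compo; Pre_ excludes that, headD "" is the total stand-in
def gen_h_code (rules : List (List (List String))) : String :=
  (rules.foldl (fun st rule =>
    rule.foldl (fun st compo =>
      (compo.headD "").toList.foldl (fun st char =>
        if char ∉ st.1 then
          (st.1 ++ [char], st.2 ++ ("char **parse_" ++ processWord (String.ofList [char]) ++ "(char **word);\n"))
        else st) st) st) (([] : List Char), "")).2

-- ===== PORT B =====
-- flat.index c never raises on elements of set(flat); getD 0 is the total stand-in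
def gen_h_code_alt (rules : List (List (List String))) : String :=
  let flat := rules.flatMap (fun rule => rule.flatMap (fun compo => (compo.headD "").toList))
  let uniq := PySem.List.sorted (PySem.Set.ofList flat)
    (fun c => ((PySem.List.index? flat c).getD 0 : Nat))
  PySem.Str.join "" (uniq.map (fun c => "char **parse_" ++ processWord (String.ofList [c]) ++ "(char **word);\n"))

-- ===== PRECONDITION & SPEC =====
-- Pre_ excludes only inputs where the Python A raises IndexError: a rule containing an empty compo list.
def Pre_gen_h_code (rules : List (List (List String))) : Prop :=
  (rules.all (fun rule => rule.all (fun compo => !compo.isEmpty))) = true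
instance (rules : List (List (List String))) : Decidable (Pre_gen_h_code rules) := by
  unfold Pre_gen_h_code; infer_instance

def pvWitness_gen_h_code : List (List (List String)) := [[["ab", "x"], ["a;"]], [["b"]]]

def Spec_gen_h_code (rules : List (List (List String))) (out : String) : Prop := out = gen_h_code_alt rules
instance (rules : List (List (List String))) (out : String) : Decidable (Spec_gen_h_code rules out) := by unfold Spec_gen_h_code; infer_instance

-- ===== CLAIM (what is proved, stated in full; the proofs are below) =====
def Claim_equal_gen_h_code : Prop := ∀ (rules : List (List (List String))), Dom_gen_h_code rules → Pre_gen_h_code rules → Spec_gen_h_code rules (gen_h_code rules)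

-- ===== LEMMAS AND PROOFS =====

-- the emission line for one character
def pvLine (c : Char) : String := "char **parse_" ++ processWord (String.ofList [c]) ++ "(char **word);\n"

-- A's loop body over a single character
def pvStep (st : List Char × String) (c : Char) : List Char × String :=
  if c ∉ st.1 then (st.1 ++ [c], st.2 ++ pvLine c) else st

-- first-occurrence chars of cs that are not already in ag
def pvNew (ag : List Char) : List Char → List Char
  | [] => []
  | c :: cs => if c ∈ ag then pvNew ag cs else c :: pvNew (ag ++ [c]) cs

-- the first-occurrence index key B sorts by
def pvIdx (flat : List Char) (c : Char) : Nat := (PySem.List.index? flat c).getD 0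

theorem pvJoin_nil : PySem.Str.join "" ([] : List String) = "" := by
  simp [PySem.Str.join, PySem.Chars.join_nil]

theorem pvJoin_cons (s : String) (l : List String) :
    PySem.Str.join "" (s :: l) = s ++ PySem.Str.join "" l := by
  cases l with
  | nil => simp [PySem.Str.join, PySem.Chars.join_singleton, PySem.Chars.join_nil]
  | cons t l => simp [PySem.Str.join, PySem.Chars.join_cons_cons]

-- A's fold over a char list produces (updated seen-list, code ++ lines of the new chars)
theorem pvFold_chars (cs : List Char) (ag : List Char) (code : String) :
    cs.foldl pvStep (ag, code) =
      (ag ++ pvNew ag cs, code ++ PySem.Str.join "" ((pvNew ag cs).map pvLine)) := by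
  induction cs generalizing ag code with
  | nil => simp [pvNew, pvJoin_nil]
  | cons c cs ih =>
    by_cases h : c ∈ ag
    · simp [pvStep, h, pvNew, ih]
    · simp only [List.foldl_cons, pvStep, h, if_pos, List.map_cons, pvNew, if_neg,
        not_false_eq_true, pvJoin_cons]
      rw [ih (ag ++ [c]) (code ++ pvLine c)]
      simp [String.append_assoc, List.append_assoc]

-- PySem's set construction (set(xs)) computes pvNew [] via Set.add folding
theorem pvSet_foldl_add (cs ag : List Char) :
    cs.foldl PySem.Set.add ag = ag ++ pvNew ag cs := by
  induction cs generalizing ag with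
  | nil => simp [pvNew]
  | cons c cs ih =>
    by_cases h : c ∈ ag
    · simp [pvNew, h, ih]
    · simp only [List.foldl_cons, PySem.Set.add_of_not_mem h, pvNew, h, if_neg,
        not_false_eq_true]
      rw [ih (ag ++ [c])]
      simp

theorem pvOfList_eq (cs : List Char) : PySem.Set.ofList cs = pvNew [] cs := by
  have := pvSet_foldl_add cs []
  simpa [PySem.Set.ofList_eq_foldl] using this

-- elements produced by pvNew come from cs and avoid ag
theorem pvNew_mem (cs : List Char) (ag : List Char) :
    ∀ d ∈ pvNew ag cs, d ∈ cs ∧ d ∉ ag := by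
  induction cs generalizing ag with
  | nil => simp [pvNew]
  | cons c cs ih =>
    intro d hd
    by_cases h : c ∈ ag
    · rcases ih ag d (by simpa [pvNew, h] using hd) with ⟨h1, h2⟩
      exact ⟨List.mem_cons_of_mem _ h1, h2⟩
    · simp only [pvNew, h, if_neg, not_false_eq_true] at hd
      rcases List.mem_cons.mp hd with rfl | hd
      · exact ⟨List.mem_cons_self, h⟩
      · rcases ih (ag ++ [c]) d hd with ⟨h1, h2⟩
        simp only [List.mem_append, List.mem_singleton, not_or] at h2
        exact ⟨List.mem_cons_of_mem _ h1, h2.1⟩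

theorem pvIdx_cons_self (c : Char) (cs : List Char) : pvIdx (c :: cs) c = 0 := by
  unfold pvIdx; rw [PySem.List.index?_cons_self]; rfl

theorem pvIdx_cons_of_ne {c d : Char} (cs : List Char) (hne : c ≠ d) (hm : d ∈ cs) :
    pvIdx (c :: cs) d = pvIdx cs d + 1 := by
  rcases Option.isSome_iff_exists.mp ((PySem.List.index?_isSome_iff cs d).mpr hm) with ⟨k, hk⟩
  unfold pvIdx
  rw [PySem.List.index?_cons_of_ne cs hne, hk]
  rfl

-- pvNew lists its chars in strictly increasing order of first index in cs
theorem pvNew_pairwise (cs : List Char) (ag : List Char) :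
    (pvNew ag cs).Pairwise (fun a b => pvIdx cs a < pvIdx cs b) := by
  induction cs generalizing ag with
  | nil => simp [pvNew]
  | cons c cs ih =>
    by_cases h : c ∈ ag
    · simp only [pvNew, h, if_pos]
      refine (ih ag).imp_of_mem ?_
      intro a b ha hb hab
      have hane : c ≠ a := fun he => (pvNew_mem cs ag a ha).2 (he ▸ h)
      have hbne : c ≠ b := fun he => (pvNew_mem cs ag b hb).2 (he ▸ h)
      rw [pvIdx_cons_of_ne cs hane (pvNew_mem cs ag a ha).1,
          pvIdx_cons_of_ne cs hbne (pvNew_mem cs ag b hb).1]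
      omega
    · simp only [pvNew, h, if_neg, not_false_eq_true]
      constructor
      · intro b hb
        have hbne : c ≠ b := fun he => by
          have := (pvNew_mem cs (ag ++ [c]) b hb).2
          simp [← he] at this
        rw [pvIdx_cons_self, pvIdx_cons_of_ne cs hbne (pvNew_mem cs (ag ++ [c]) b hb).1]
        omega
      · refine (ih (ag ++ [c])).imp_of_mem ?_
        intro a b ha hb hab
        have hane : c ≠ a := fun he => by
          have := (pvNew_mem cs (ag ++ [c]) a ha).2; simp [← he] at this
        have hbne : c ≠ b := fun he => by
          have := (pvNew_mem cs (ag ++ [c]) b hb).2; simp [← he] at this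
        rw [pvIdx_cons_of_ne cs hane (pvNew_mem cs (ag ++ [c]) a ha).1,
            pvIdx_cons_of_ne cs hbne (pvNew_mem cs (ag ++ [c]) b hb).1]
        omega

-- sorting set(flat) by first index recovers exactly the first-occurrence dedup order
theorem pvSorted_eq (flat : List Char) :
    PySem.List.sorted (PySem.Set.ofList flat) (fun c => pvIdx flat c) false
      = pvNew [] flat := by
  apply PySem.List.sorted_eq_of_perm_of_pairwise_lt
  · rw [pvOfList_eq]
  · exact pvNew_pairwise flat []

-- A's nested folds equal one fold over the flattened char list
theorem pvFold_flat (rules : List (List (List String))) (st : List Char × String) :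
    rules.foldl (fun st rule =>
      rule.foldl (fun st compo => (compo.headD "").toList.foldl pvStep st) st) st
    = (rules.flatMap (fun rule => rule.flatMap (fun compo => (compo.headD "").toList))).foldl pvStep st := by
  induction rules generalizing st with
  | nil => rfl
  | cons rule rules ih =>
    simp only [List.foldl_cons, List.flatMap_cons, List.foldl_append, ih]
    congr 1
    induction rule generalizing st with
    | nil => rfl
    | cons compo rule ihr => simp only [List.foldl_cons, List.flatMap_cons, List.foldl_append, ihr]

-- ===== VERDICT (by name: the statement is the Claim_ definition above) =====
theorem gen_h_code_spec : Claim_equal_gen_h_code := by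
  intro rules _ _
  unfold Spec_gen_h_code gen_h_code gen_h_code_alt
  show (rules.foldl (fun st rule =>
      rule.foldl (fun st compo => (compo.headD "").toList.foldl pvStep st) st)
        (([] : List Char), "")).2 = _
  rw [pvFold_flat, pvFold_chars]
  show _ = PySem.Str.join "" ((PySem.List.sorted _ (fun c => pvIdx _ c) false).map _)
  rw [pvSorted_eq]
  rfl
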